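-- pv_equiv track=rewrite | github.com/harshchouhan3122/Company-wise_Technical_Interview_Coding-Questions | Sahaj/Sol2.py | calculate_spillage
-- ===== SOURCE A (Python) =====
-- def can_deliver_water(villages, water_needs, capacity, max_trips):
--     trips = 0
--     water_left = capacity
--
--     for i in range(villages):
--         if water_needs[i] > capacity:
--             return False
--         if water_left < water_needs[i]:
--             trips += 1
--             water_left = capacity
--         water_left -= water_needs[i]
--
--     if water_left > 0:
--         trips += 1
--
--     return trips <= max_trips
--
-- def calculate_spillage(villages, water_needs, max_trips):
--     left, right = 1, sum(water_needs)
--     result = -1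
--
--     while left <= right:
--         mid = (left + right) // 2
--         if can_deliver_water(villages, water_needs, mid, max_trips):
--             result = mid
--             right = mid - 1
--         else:
--             left = mid + 1
--
--     if result == -1:
--         return -1
--
--     spillage = 0
--     trips = 0
--     water_left = result
--
--     for i in range(villages):
--         if water_needs[i] > result:
--             return -1
--         if water_left < water_needs[i]:
--             trips += 1
--             spillage += water_left
--             water_left = result
--         water_left -= water_needs[i]
--
--     if water_left > 0:
--         trips += 1
--         spillage += water_left
--
--     return spillage
-- ===== SOURCE B (Python) =====
-- def calculate_spillage(villages, water_needs, max_trips):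
--     needs = water_needs[:max(0, villages)]
--     prefix = [0]
--     for w in needs:
--         prefix.append(prefix[-1] + w)
--     total = sum(needs)
--
--     def survey(c):
--         # segment scan over cumulative totals: a new tanker load starts
--         # exactly when the next cumulative need passes base + c
--         resets, base, prev = 0, 0, 0
--         for p in prefix[1:]:
--             if p > base + c:
--                 resets += 1
--                 base = prev
--             prev = p
--         return resets, base
--
--     def feasible(c):
--         if any(w > c for w in needs):
--             return False
--         resets, base = survey(c)
--         trips = resets + (1 if c - (total - base) > 0 else 0)
--         return trips <= max_trips
--
--     def search(lo, hi, best):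
--         if lo > hi:
--             return best
--         mid = (lo + hi) // 2
--         if feasible(mid):
--             return search(lo, mid - 1, mid)
--         return search(mid + 1, hi, best)
--
--     best = search(1, sum(water_needs), -1)
--     if best == -1:
--         return -1
--     loads = 1 + survey(best)[0]
--     return best * loads - total
-- ===== Notes on version B (the rewrite author's own statement) =====
-- stated objective: alternative
-- what changed: B replaces A's tanker simulation with a prefix-sum formulation: it builds the cumulative-need array once, decides feasibility by a segment scan over the cumulative totals (a new load starts exactly when a prefix sum passes base + capacity) instead of tracking the remaining water per village, drives the capacity search by a recursive lower-bound search, and obtains the spillage from the conservation identity capacity*loads - total delivered, dropping A's second leftover-accumulating delivery pass entirely.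
-- outside the precondition, e.g. on calculate_spillage(3, [5, -3], 1): A returns -1, B returns -1
import Mathlib
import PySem

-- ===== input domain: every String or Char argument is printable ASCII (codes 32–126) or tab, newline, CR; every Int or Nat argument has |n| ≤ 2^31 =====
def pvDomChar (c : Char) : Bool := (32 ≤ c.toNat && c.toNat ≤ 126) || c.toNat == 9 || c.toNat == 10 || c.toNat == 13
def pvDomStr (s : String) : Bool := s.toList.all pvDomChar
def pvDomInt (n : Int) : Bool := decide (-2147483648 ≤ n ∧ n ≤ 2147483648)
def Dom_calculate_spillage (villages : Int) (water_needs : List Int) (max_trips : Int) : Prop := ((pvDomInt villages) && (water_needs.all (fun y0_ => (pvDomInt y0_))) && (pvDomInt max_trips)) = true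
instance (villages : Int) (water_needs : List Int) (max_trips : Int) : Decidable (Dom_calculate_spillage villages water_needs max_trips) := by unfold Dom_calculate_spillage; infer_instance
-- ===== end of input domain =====

-- B recasts the task over cumulative sums: feasibility by a segment scan over the
-- prefix-sum array (a load ends where a prefix sum passes base + capacity), a recursive
-- capacity search, and the spillage from capacity*loads - total delivered, with no
-- second delivery pass (objective: alternative).

-- ===== PORT A =====
-- helper can_deliver_water: 'for i in range(villages)' with early 'return False'
def canDeliverGo (ws : List Int) (cap mt : Int) : List Int → Int → Int → Bool
  | [], trips, left => decide ((if 0 < left then trips + 1 else trips) ≤ mt)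
  | i :: rest, trips, left =>
    let w := PySem.List.pyGetD ws i 0   -- water_needs[i]; IndexError excluded by Pre_
    if cap < w then false
    else if left < w then canDeliverGo ws cap mt rest (trips + 1) (cap - w)
    else canDeliverGo ws cap mt rest trips (left - w)

def can_deliver_water (villages : Int) (ws : List Int) (cap mt : Int) : Bool :=
  canDeliverGo ws cap mt (PySem.List.pyRange 0 villages 1) 0 cap

-- the 'while left <= right' binary-search loop of A
def searchA (villages : Int) (ws : List Int) (mt : Int) (lo hi res : Int) : Int :=
  if h : lo ≤ hi then
    if can_deliver_water villages ws (PySem.Int.floordiv (lo + hi) 2) mt then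
      searchA villages ws mt lo (PySem.Int.floordiv (lo + hi) 2 - 1) (PySem.Int.floordiv (lo + hi) 2)
    else searchA villages ws mt (PySem.Int.floordiv (lo + hi) 2 + 1) hi res
  else res
termination_by (hi + 1 - lo).toNat
decreasing_by
  · have hb := PySem.Int.floordiv_two_mid_bounds h; omega
  · have hb := PySem.Int.floordiv_two_mid_bounds h; omega

-- A's second loop: accumulate spillage (the 'trips' variable is dead in A, kept literally)
def spillGo (ws : List Int) (cap : Int) : List Int → Int → Int → Int → Int
  | [], sp, _trips, left => if 0 < left then sp + left else sp
  | i :: rest, sp, trips, left =>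
    let w := PySem.List.pyGetD ws i 0   -- water_needs[i]; IndexError excluded by Pre_
    if cap < w then -1
    else if left < w then spillGo ws cap rest (sp + left) (trips + 1) (cap - w)
    else spillGo ws cap rest sp trips (left - w)

def calculate_spillage (villages : Int) (water_needs : List Int) (max_trips : Int) : Int :=
  let result := searchA villages water_needs max_trips 1 water_needs.sum (-1)
  if result = -1 then -1
  else spillGo water_needs result (PySem.List.pyRange 0 villages 1) 0 0 result

-- ===== PORT B =====
-- the 'prefix.append(prefix[-1] + w)' loop: prefix = 0 :: buildPrefix needs 0
def buildPrefix : List Int → Int → List Int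
  | [], _ => []
  | w :: rest, acc => (acc + w) :: buildPrefix rest (acc + w)

-- survey(c): scan prefix[1:] with (resets, base, prev)
def surveyGo (c : Int) : List Int → Int → Int → Int → Int × Int
  | [], resets, base, _prev => (resets, base)
  | p :: rest, resets, base, prev =>
    if base + c < p then surveyGo c rest (resets + 1) prev p
    else surveyGo c rest resets base p

def feasibleB (needs ps : List Int) (total mt c : Int) : Bool :=
  if needs.any (fun w => decide (c < w)) then false
  else
    decide (((surveyGo c ps 0 0 0).1 +
      (if 0 < c - (total - (surveyGo c ps 0 0 0).2) then 1 else 0)) ≤ mt)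

-- the recursive search(lo, hi, best) of B
def searchB (needs ps : List Int) (total mt : Int) (lo hi best : Int) : Int :=
  if h : lo ≤ hi then
    if feasibleB needs ps total mt (PySem.Int.floordiv (lo + hi) 2) then
      searchB needs ps total mt lo (PySem.Int.floordiv (lo + hi) 2 - 1) (PySem.Int.floordiv (lo + hi) 2)
    else searchB needs ps total mt (PySem.Int.floordiv (lo + hi) 2 + 1) hi best
  else best
termination_by (hi + 1 - lo).toNat
decreasing_by
  · have hb := PySem.Int.floordiv_two_mid_bounds h; omega
  · have hb := PySem.Int.floordiv_two_mid_bounds h; omega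

def calculate_spillage_alt (villages : Int) (water_needs : List Int) (max_trips : Int) : Int :=
  let needs := PySem.List.slice water_needs none (some (max 0 villages))
  let ps := buildPrefix needs 0
  let total := needs.sum
  let best := searchB needs ps total max_trips 1 water_needs.sum (-1)
  if best = -1 then -1
  else best * (1 + (surveyGo best ps 0 0 0).1) - total

-- ===== PRECONDITION & SPEC =====
-- Pre_ excludes villages > len(water_needs) with positive total need: there A's indexed
-- loops typically raise IndexError; on the few such inputs where feasibility fails before
-- the bad index A still returns -1 (also excluded — see the cite in claim.json).
def Pre_calculate_spillage (villages : Int) (water_needs : List Int) (max_trips : Int) : Prop :=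
  villages ≤ (water_needs.length : Int) ∨ water_needs.sum ≤ 0
instance (villages : Int) (water_needs : List Int) (max_trips : Int) : Decidable (Pre_calculate_spillage villages water_needs max_trips) := by unfold Pre_calculate_spillage; infer_instance

def pvWitness_calculate_spillage : Int × List Int × Int := (3, [3, 4, 2], 2)

def Spec_calculate_spillage (villages : Int) (water_needs : List Int) (max_trips : Int) (out : Int) : Prop := out = calculate_spillage_alt villages water_needs max_trips
instance (villages : Int) (water_needs : List Int) (max_trips : Int) (out : Int) : Decidable (Spec_calculate_spillage villages water_needs max_trips out) := by unfold Spec_calculate_spillage; infer_instance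

-- ===== CLAIM (what is proved, stated in full; the proofs are below) =====
def Claim_equal_calculate_spillage : Prop := ∀ (villages : Int) (water_needs : List Int) (max_trips : Int), Dom_calculate_spillage villages water_needs max_trips → Pre_calculate_spillage villages water_needs max_trips → Spec_calculate_spillage villages water_needs max_trips (calculate_spillage villages water_needs max_trips)

-- ===== LEMMAS AND PROOFS =====

-- proof-side mirror of A's can_deliver_water loop, over the value list
def cdList (cap mt : Int) : List Int → Int → Int → Bool
  | [], trips, left => decide ((if 0 < left then trips + 1 else trips) ≤ mt)
  | w :: rest, trips, left =>
    if cap < w then false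
    else if left < w then cdList cap mt rest (trips + 1) (cap - w)
    else cdList cap mt rest trips (left - w)

-- proof-side mirror of A's spillage loop, over the value list
def spillList (cap : Int) : List Int → Int → Int → Int → Int
  | [], sp, _t, left => if 0 < left then sp + left else sp
  | w :: rest, sp, t, left =>
    if cap < w then -1
    else if left < w then spillList cap rest (sp + left) (t + 1) (cap - w)
    else spillList cap rest sp t (left - w)

theorem cdGo_range (ws : List Int) (cap mt : Int) :
    ∀ (n : Nat) (i t l : Int), 0 ≤ i → i.toNat + n ≤ ws.length →
    canDeliverGo ws cap mt (PySem.List.pyRange i (i + (n : Int)) 1) t l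
      = cdList cap mt ((ws.drop i.toNat).take n) t l := by
  intro n
  induction n with
  | zero =>
    intro i t l _ _
    rw [Nat.cast_zero, add_zero, PySem.List.pyRange_one_eq_nil (le_refl i)]
    simp [canDeliverGo, cdList]
  | succ n ih =>
    intro i t l hi hlen
    have hiN : i.toNat < ws.length := by omega
    have hlt : i < i + ((n + 1 : Nat) : Int) := by push_cast; omega
    have harg : i + ((n + 1 : Nat) : Int) = (i + 1) + (n : Int) := by push_cast; ring
    rw [PySem.List.pyRange_one_cons hlt, harg, List.drop_eq_getElem_cons hiN, List.take_succ_cons]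
    have hw : PySem.List.pyGetD ws i 0 = ws[i.toNat] :=
      PySem.List.pyGetD_eq_getElem ws 0 hi (by omega)
    simp only [canDeliverGo, cdList, hw]
    have h1 : (i + 1).toNat = i.toNat + 1 := by omega
    by_cases hc : cap < ws[i.toNat]
    · simp [hc]
    · rw [if_neg hc, if_neg hc]
      by_cases hl : l < ws[i.toNat]
      · rw [if_pos hl, if_pos hl, ih (i + 1) (t + 1) (cap - ws[i.toNat]) (by omega) (by omega), h1]
      · rw [if_neg hl, if_neg hl, ih (i + 1) t (l - ws[i.toNat]) (by omega) (by omega), h1]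

theorem spillGo_range (ws : List Int) (cap : Int) :
    ∀ (n : Nat) (i sp t l : Int), 0 ≤ i → i.toNat + n ≤ ws.length →
    spillGo ws cap (PySem.List.pyRange i (i + (n : Int)) 1) sp t l
      = spillList cap ((ws.drop i.toNat).take n) sp t l := by
  intro n
  induction n with
  | zero =>
    intro i sp t l _ _
    rw [Nat.cast_zero, add_zero, PySem.List.pyRange_one_eq_nil (le_refl i)]
    simp [spillGo, spillList]
  | succ n ih =>
    intro i sp t l hi hlen
    have hiN : i.toNat < ws.length := by omega
    have hlt : i < i + ((n + 1 : Nat) : Int) := by push_cast; omega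
    have harg : i + ((n + 1 : Nat) : Int) = (i + 1) + (n : Int) := by push_cast; ring
    rw [PySem.List.pyRange_one_cons hlt, harg, List.drop_eq_getElem_cons hiN, List.take_succ_cons]
    have hw : PySem.List.pyGetD ws i 0 = ws[i.toNat] :=
      PySem.List.pyGetD_eq_getElem ws 0 hi (by omega)
    simp only [spillGo, spillList, hw]
    have h1 : (i + 1).toNat = i.toNat + 1 := by omega
    by_cases hc : cap < ws[i.toNat]
    · rw [if_pos hc, if_pos hc]
    · rw [if_neg hc, if_neg hc]
      by_cases hl : l < ws[i.toNat]
      · rw [if_pos hl, if_pos hl, ih (i + 1) (sp + l) (t + 1) (cap - ws[i.toNat]) (by omega) (by omega), h1]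
      · rw [if_neg hl, if_neg hl, ih (i + 1) sp t (l - ws[i.toNat]) (by omega) (by omega), h1]

-- A's scan returns False as soon as some need exceeds the capacity
theorem cdList_false (c mt : Int) :
    ∀ (rest : List Int) (t l : Int),
    rest.any (fun w => decide (c < w)) = true → cdList c mt rest t l = false := by
  intro rest
  induction rest with
  | nil => intro t l h; simp at h
  | cons w rest ih =>
    intro t l h
    simp only [cdList]
    by_cases hw : c < w
    · rw [if_pos hw]
    · rw [if_neg hw]
      have hr : rest.any (fun w => decide (c < w)) = true := by
        simpa [hw] using h
      by_cases hl : l < w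
      · rw [if_pos hl, ih _ _ hr]
      · rw [if_neg hl, ih _ _ hr]

-- the core correspondence: A's water_left simulation ↔ B's prefix-sum segment scan
-- (invariant: water_left = base + c - prev)
theorem cd_survey (c mt : Int) :
    ∀ (rest : List Int) (prev t base : Int),
    (∀ w ∈ rest, ¬ c < w) →
    cdList c mt rest t (base + c - prev)
      = decide (((surveyGo c (buildPrefix rest prev) t base prev).1 +
          (if 0 < c - ((prev + rest.sum) - (surveyGo c (buildPrefix rest prev) t base prev).2) then 1 else 0)) ≤ mt) := by
  intro rest
  induction rest with
  | nil =>
    intro prev t base _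
    simp only [cdList, buildPrefix, surveyGo, List.sum_nil, add_zero]
    rw [decide_eq_decide]
    split_ifs <;> omega
  | cons w rest ih =>
    intro prev t base hall
    have hw : ¬ c < w := hall w (by simp)
    simp only [cdList, buildPrefix, surveyGo, if_neg hw, List.sum_cons]
    have hs : prev + (w + rest.sum) = (prev + w) + rest.sum := by ring
    simp only [hs]
    by_cases hr : base + c - prev < w
    · have hr2 : base + c < prev + w := by omega
      rw [if_pos hr, if_pos hr2]
      have hl : c - w = prev + c - (prev + w) := by ring
      rw [hl, ih (prev + w) (t + 1) prev (fun x hx => hall x (by simp [hx]))]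
    · have hr2 : ¬ base + c < prev + w := by omega
      rw [if_neg hr, if_neg hr2]
      have hl : base + c - prev - w = base + c - (prev + w) := by ring
      rw [hl, ih (prev + w) t base (fun x hx => hall x (by simp [hx]))]

-- conservation: the accumulated spillage equals capacity·(loads-1) + leftover mass
theorem spill_survey (c : Int) :
    ∀ (rest : List Int) (prev sp t base r0 : Int),
    (∀ w ∈ rest, ¬ c < w) → 0 ≤ base + c - prev →
    spillList c rest sp t (base + c - prev)
      = sp + (base + c - prev) + c * ((surveyGo c (buildPrefix rest prev) r0 base prev).1 - r0) - rest.sum := by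
  intro rest
  induction rest with
  | nil =>
    intro prev sp t base r0 _ hnn
    simp only [spillList, buildPrefix, surveyGo, List.sum_nil]
    by_cases h : 0 < base + c - prev
    · rw [if_pos h]; ring
    · have h0 : base + c - prev = 0 := by omega
      rw [if_neg h, h0]; ring
  | cons w rest ih =>
    intro prev sp t base r0 hall hnn
    have hw : ¬ c < w := hall w (by simp)
    simp only [spillList, buildPrefix, surveyGo, if_neg hw, List.sum_cons]
    by_cases hr : base + c - prev < w
    · have hr2 : base + c < prev + w := by omega
      rw [if_pos hr, if_pos hr2]
      have hl : c - w = prev + c - (prev + w) := by ring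
      rw [hl, ih (prev + w) (sp + (base + c - prev)) (t + 1) prev (r0 + 1)
            (fun x hx => hall x (by simp [hx])) (by omega)]
      ring
    · have hr2 : ¬ base + c < prev + w := by omega
      rw [if_neg hr, if_neg hr2]
      have hl : base + c - prev - w = base + c - (prev + w) := by ring
      rw [hl, ih (prev + w) sp t base r0 (fun x hx => hall x (by simp [hx])) (by omega)]
      ring

theorem search_eq (v : Int) (ws needs ps : List Int) (total mt : Int)
    (hf : ∀ c, can_deliver_water v ws c mt = feasibleB needs ps total mt c) :
    ∀ (n : Nat) (lo hi res : Int), (hi + 1 - lo).toNat ≤ n →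
    searchA v ws mt lo hi res = searchB needs ps total mt lo hi res := by
  intro n
  induction n with
  | zero =>
    intro lo hi res hn
    rw [searchA, searchB]
    have : ¬ lo ≤ hi := by omega
    simp [this]
  | succ n ih =>
    intro lo hi res hn
    rw [searchA, searchB]
    by_cases h : lo ≤ hi
    · have hb := PySem.Int.floordiv_two_mid_bounds h
      rw [dif_pos h, dif_pos h, hf]
      by_cases hc : feasibleB needs ps total mt (PySem.Int.floordiv (lo + hi) 2)
      · rw [if_pos hc, if_pos hc, ih _ _ _ (by omega)]
      · rw [if_neg hc, if_neg hc, ih _ _ _ (by omega)]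
    · rw [dif_neg h, dif_neg h]

theorem search_inv (v : Int) (ws : List Int) (mt : Int) :
    ∀ (n : Nat) (lo hi res : Int), (hi + 1 - lo).toNat ≤ n → 1 ≤ lo →
    (res = -1 ∨ (1 ≤ res ∧ can_deliver_water v ws res mt = true)) →
    (searchA v ws mt lo hi res = -1 ∨
      (1 ≤ searchA v ws mt lo hi res ∧ can_deliver_water v ws (searchA v ws mt lo hi res) mt = true)) := by
  intro n
  induction n with
  | zero =>
    intro lo hi res hn hlo hres
    rw [searchA]
    have : ¬ lo ≤ hi := by omega
    simp only [dif_neg this]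
    exact hres
  | succ n ih =>
    intro lo hi res hn hlo hres
    rw [searchA]
    by_cases h : lo ≤ hi
    · have hb := PySem.Int.floordiv_two_mid_bounds h
      rw [dif_pos h]
      by_cases hc : can_deliver_water v ws (PySem.Int.floordiv (lo + hi) 2) mt
      · rw [if_pos hc]
        exact ih _ _ _ (by omega) hlo (Or.inr ⟨by omega, hc⟩)
      · rw [if_neg hc]
        exact ih _ _ _ (by omega) (by omega) hres
    · rw [dif_neg h]
      exact hres

-- ===== VERDICT (by name: the statement is the Claim_ definition above) =====
theorem calculate_spillage_spec : Claim_equal_calculate_spillage := by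
  intro v ws mt _hDom hPre
  show calculate_spillage v ws mt = calculate_spillage_alt v ws mt
  simp only [calculate_spillage, calculate_spillage_alt]
  by_cases hsum : ws.sum < 1
  · have hA : searchA v ws mt 1 ws.sum (-1) = -1 := by
      rw [searchA]; exact dif_neg (by omega)
    have hB : ∀ needs ps total, searchB needs ps total mt 1 ws.sum (-1) = -1 := by
      intro needs ps total
      rw [searchB]; exact dif_neg (by omega)
    rw [hA, hB]
    simp
  · have hv : v ≤ (ws.length : Int) := hPre.resolve_right (by omega)
    obtain ⟨needs, hneeds⟩ : ∃ l, PySem.List.slice ws none (some (max 0 v)) = l := ⟨_, rfl⟩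
    have hneeds_take : needs = ws.take (max 0 v).toNat := by
      rw [← hneeds]; exact PySem.List.slice_to ws (le_max_left 0 v)
    rw [hneeds]
    -- can_deliver_water over indices equals the list scan over the sliced prefix
    have hcd : ∀ c, can_deliver_water v ws c mt = cdList c mt needs 0 c := by
      intro c
      by_cases hv0 : v ≤ 0
      · have hrange : PySem.List.pyRange 0 v 1 = [] := PySem.List.pyRange_one_eq_nil hv0
        have hn0 : (max 0 v).toNat = 0 := by omega
        rw [can_deliver_water, hrange, hneeds_take, hn0, List.take_zero]
        rfl
      · have hcast : ((v.toNat : Int)) = v := by omega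
        have h := cdGo_range ws c mt v.toNat 0 0 c (le_refl 0) (by omega)
        rw [zero_add, hcast] at h
        have hmax : (max 0 v).toNat = v.toNat := by omega
        rw [can_deliver_water, h, hneeds_take, hmax]
        simp
    have hfeas : ∀ c, can_deliver_water v ws c mt = feasibleB needs (buildPrefix needs 0) needs.sum mt c := by
      intro c
      rw [hcd c, feasibleB]
      by_cases ha : needs.any (fun w => decide (c < w))
      · rw [if_pos ha]
        exact cdList_false c mt needs 0 c ha
      · rw [if_neg ha]
        have hall : ∀ w ∈ needs, ¬ c < w := by
          intro w hwmem hgt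
          exact ha (List.any_eq_true.mpr ⟨w, hwmem, by simp [hgt]⟩)
        have h := cd_survey c mt needs 0 0 0 hall
        rw [show (0 : Int) + c - 0 = c by ring, show (0 : Int) + needs.sum = needs.sum by ring] at h
        rw [h]
    have hsearch : searchA v ws mt 1 ws.sum (-1) = searchB needs (buildPrefix needs 0) needs.sum mt 1 ws.sum (-1) :=
      search_eq v ws needs (buildPrefix needs 0) needs.sum mt hfeas ws.sum.toNat 1 ws.sum (-1) (by omega)
    rw [hsearch]
    obtain ⟨r, hr⟩ : ∃ r, searchB needs (buildPrefix needs 0) needs.sum mt 1 ws.sum (-1) = r := ⟨_, rfl⟩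
    rw [hr] at hsearch ⊢
    by_cases hres : r = -1
    · rw [if_pos hres, if_pos hres]
    · rw [if_neg hres, if_neg hres]
      have hinv := search_inv v ws mt ws.sum.toNat 1 ws.sum (-1) (by omega) (by omega) (Or.inl rfl)
      rw [hsearch] at hinv
      obtain ⟨hr1, hfr⟩ := hinv.resolve_left hres
      rw [hfeas] at hfr
      have hany : needs.any (fun w => decide (r < w)) = false := by
        cases ha : needs.any (fun w => decide (r < w)) with
        | false => rfl
        | true => rw [feasibleB, if_pos ha] at hfr; exact absurd hfr (by simp)
      have hall : ∀ w ∈ needs, ¬ r < w := by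
        intro w hwmem hgt
        have : needs.any (fun w => decide (r < w)) = true :=
          List.any_eq_true.mpr ⟨w, hwmem, by simp [hgt]⟩
        rw [this] at hany
        exact absurd hany (by simp)
      -- A's second pass over indices equals the list pass over needs
      have hspill : spillGo ws r (PySem.List.pyRange 0 v 1) 0 0 r = spillList r needs 0 0 r := by
        by_cases hv0 : v ≤ 0
        · have hrange : PySem.List.pyRange 0 v 1 = [] := PySem.List.pyRange_one_eq_nil hv0
          have hn0 : (max 0 v).toNat = 0 := by omega
          rw [hrange, hneeds_take, hn0, List.take_zero]
          rfl
        · have hcast : ((v.toNat : Int)) = v := by omega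
          have h := spillGo_range ws r v.toNat 0 0 0 r (le_refl 0) (by omega)
          rw [zero_add, hcast] at h
          have hmax : (max 0 v).toNat = v.toNat := by omega
          rw [h, hneeds_take, hmax]
          simp
      have hconv := spill_survey r needs 0 0 0 0 0 hall (by omega)
      rw [show (0 : Int) + r - 0 = r by ring] at hconv
      rw [hspill, hconv]
      ring
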